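-- pv_equiv track=rewrite | github.com/marvande/MassBalanceMachine | regions/TF_Europe/scripts/plotting/style.py | alpha_labels
-- ===== SOURCE A (Python) =====
-- def alpha_labels(n: int):
--     """
--     Generate subplot labels '(a)', '(b)', ... '(z)', '(aa)', '(ab)', ... .
--
--     Parameters
--     ----------
--     n : int
--         Number of labels to generate.
--
--     Returns
--     -------
--     list of str
--         List of n labels formatted as '(...)'.
--     """
--
--     def to_label(k: int) -> str:
--         # 0 -> a, 25 -> z, 26 -> aa, ...
--         s = ""
--         k += 1
--         while k > 0:
--             k, r = divmod(k - 1, 26)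
--             s = chr(97 + r) + s
--         return f"({s})"
--
--     return [to_label(i) for i in range(n)]
-- ===== SOURCE B (Python) =====
-- def alpha_labels(n: int):
--     """Generate subplot labels '(a)', '(b)', ... '(z)', '(aa)', ... ."""
--
--     def to_label(k: int) -> str:
--         q, r = divmod(k, 26)
--         return (to_label(q - 1) if q > 0 else "") + chr(97 + r)
--
--     return ["(%s)" % to_label(i) for i in range(n)]
-- ===== Notes on version B (the rewrite author's own statement) =====
-- stated objective: alternative
-- what changed: The per-index converter is rewritten as recursion on the bijective-base-26 quotient that appends the last digit, replacing A's while-loop that pre-increments k and prepends digits into an accumulator string.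
import Mathlib
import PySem

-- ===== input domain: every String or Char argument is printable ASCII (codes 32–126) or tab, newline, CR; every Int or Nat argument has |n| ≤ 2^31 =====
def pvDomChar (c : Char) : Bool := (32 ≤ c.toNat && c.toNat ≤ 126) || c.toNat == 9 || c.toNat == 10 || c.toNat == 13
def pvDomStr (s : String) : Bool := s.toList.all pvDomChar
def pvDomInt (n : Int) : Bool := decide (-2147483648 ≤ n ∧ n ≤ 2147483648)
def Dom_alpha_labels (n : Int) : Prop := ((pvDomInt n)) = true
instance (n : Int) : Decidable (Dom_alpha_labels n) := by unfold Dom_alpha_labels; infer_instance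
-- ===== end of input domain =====

-- ===== PORT A =====
-- B rewrites the per-index converter as recursion on the base-26 quotient (alternative decomposition).
-- A's inner while loop: k, r = divmod(k-1, 26); s = chr(97+r) + s, starting from k+1.
-- Faithful: for k < 0 the toNat gives 0 and the loop body never runs, exactly as in Python.
def aLoop (k : Nat) (s : List Char) : List Char :=
  if k = 0 then s
  else aLoop ((k - 1) / 26) (Char.ofNat (97 + (k - 1) % 26) :: s)

def aToLabel (k : Int) : String :=
  "(" ++ String.ofList (aLoop (k + 1).toNat []) ++ ")"

def alpha_labels (n : Int) : List String :=
  (PySem.List.pyRange 0 n 1).map aToLabel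

-- ===== PORT B =====
-- Source B: q, r = divmod(k, 26); (to_label(q-1) if q > 0 else "") + chr(97+r)
def bLab (k : Nat) : List Char :=
  (if k / 26 > 0 then bLab (k / 26 - 1) else []) ++ [Char.ofNat (97 + k % 26)]
decreasing_by
  have : k / 26 ≤ k := Nat.div_le_self _ _
  omega

def alpha_labels_alt (n : Int) : List String :=
  (PySem.List.pyRange 0 n 1).map (fun i => "(" ++ String.ofList (bLab i.toNat) ++ ")")

-- ===== PRECONDITION & SPEC =====
def Spec_alpha_labels (n : Int) (out : List String) : Prop := out = alpha_labels_alt n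
instance (n : Int) (out : List String) : Decidable (Spec_alpha_labels n out) := by unfold Spec_alpha_labels; infer_instance

-- ===== CLAIM (what is proved, stated in full; the proofs are below) =====
def Claim_equal_alpha_labels : Prop := ∀ (n : Int), Dom_alpha_labels n → Spec_alpha_labels n (alpha_labels n)

-- ===== LEMMAS AND PROOFS =====

-- A's loop started at k+1 with accumulator s appends exactly B's digits of k in front of s.
theorem aLoop_eq_bLab (k : Nat) : ∀ s, aLoop (k + 1) s = bLab k ++ s := by
  induction k using Nat.strong_induction_on with
  | _ k ih =>
    intro s
    rw [aLoop]
    simp only [Nat.add_sub_cancel]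
    rw [bLab]
    by_cases h : k / 26 > 0
    · have hk : k / 26 - 1 < k := by
        have : k / 26 ≤ k := Nat.div_le_self _ _
        omega
      have hq : k / 26 = (k / 26 - 1) + 1 := by omega
      rw [hq, ih _ hk]
      simp
    · have hz : k / 26 = 0 := by omega
      rw [hz, aLoop, if_pos rfl]
      simp

-- ===== VERDICT (by name: the statement is the Claim_ definition above) =====
theorem alpha_labels_spec : Claim_equal_alpha_labels := by
  intro n _
  unfold Spec_alpha_labels alpha_labels alpha_labels_alt
  apply List.map_congr_left
  intro i hi
  have h0 : 0 ≤ i := by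
    have := PySem.List.mem_pyRange_one (a := 0) (b := n) (x := i)
    simp at *
    omega
  unfold aToLabel
  have : (i + 1).toNat = i.toNat + 1 := by omega
  rw [this, aLoop_eq_bLab]
  simp
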